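-- pv_equiv track=rewrite | github.com/RideGreg/LeetCode | Python/remove-sub-folders-from-the-filesystem.py | removeSubfolders_followup
-- ===== SOURCE A (Python) =====
-- import collections
--
-- class TrieNode:
--     def __init__(self):
--         self.is_string = False
--         self.leaves = collections.defaultdict(TrieNode)
--
-- def removeSubfolders_followup(folder):
--     def dfs(cur, path, cnt):
--         if cur.is_string:
--             cnt += 1
--         if not cur.leaves:
--             ans.append(('/' + '/'.join(path), cnt))
--             return
--         for dir, nxt in cur.leaves.items():
--             dfs(nxt, path + [dir], cnt)
--
--     root = TrieNode()
--     for f in folder: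
--         cur = root
--         for dir in f.split('/')[1:]:
--             cur = cur.leaves[dir]
--         cur.is_string = True
--
--     ans = []
--     dfs(root, [], 0)
--     return ans
-- ===== SOURCE B (Python) =====
-- def _group_by_head(rest):
--     # partition the non-empty suffixes into groups by first segment,
--     # in first-occurrence order
--     groups = []
--     while rest:
--         h = rest[0][0]
--         groups.append((h, [s[1:] for s in rest if s[0] == h]))
--         rest = [s for s in rest if s[0] != h]
--     return groups
--
-- def removeSubfolders_followup(folder):
--     ans = []
--
--     def solve(path, cnt, suffixes):
--         if [] in suffixes:
--             cnt += 1
--         rest = [s for s in suffixes if s != []]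
--         if not rest:
--             ans.append(('/' + '/'.join(path), cnt))
--             return
--         for h, g in _group_by_head(rest):
--             solve(path + [h], cnt, g)
--
--     solve([], 0, [f.split('/')[1:] for f in folder])
--     return ans
-- ===== Notes on version B (the rewrite author's own statement) =====
-- stated objective: alternative
-- what changed: B builds no trie: it recursively partitions the path-segment suffix lists by their first segment (groups in first-occurrence order) and emits each leaf path with its ancestor count directly.
import Mathlib
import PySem

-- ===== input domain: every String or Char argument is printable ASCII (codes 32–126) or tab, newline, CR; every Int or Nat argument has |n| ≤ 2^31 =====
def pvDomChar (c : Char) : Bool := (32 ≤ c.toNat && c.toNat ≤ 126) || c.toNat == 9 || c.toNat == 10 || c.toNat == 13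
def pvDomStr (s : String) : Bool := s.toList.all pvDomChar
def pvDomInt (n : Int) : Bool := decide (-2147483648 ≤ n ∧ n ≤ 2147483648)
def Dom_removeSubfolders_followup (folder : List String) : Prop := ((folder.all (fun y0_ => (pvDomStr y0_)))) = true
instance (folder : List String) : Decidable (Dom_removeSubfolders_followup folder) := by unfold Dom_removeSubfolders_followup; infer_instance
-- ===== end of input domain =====

-- B replaces A's trie construction + recursive dfs by a direct recursive partition of
-- the path-segment suffix lists by first segment (no trie); objective: alternative.

-- ===== PORT A =====
-- the trie: is_string flag + children in insertion order (mutual pair, nested inductives are not allowed)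
mutual
inductive PTrie : Type where
  | mk : Bool → PKids → PTrie
deriving Repr
inductive PKids : Type where
  | nil : PKids
  | cons : String → PTrie → PKids → PKids
deriving Repr
end

-- cur = cur.leaves[dir]: apply f to the child for d, the defaultdict creating an empty node if missing
def updKid : PKids → String → (PTrie → PTrie) → PKids
  | .nil, d, f => .cons d (f (.mk false .nil)) .nil
  | .cons k t rest, d, f => if k = d then .cons k (f t) rest else .cons k t (updKid rest d f)

-- the inner loop of the build: walk the remaining dirs, then set is_string
def insertT : PTrie → List String → PTrie
  | .mk _ kids, [] => .mk true kids
  | .mk b kids, d :: ds => .mk b (updKid kids d (fun t => insertT t ds))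

-- dfs(cur, path, cnt): the list A appends to ans, in order
mutual
def dfsT : PTrie → List String → Int → List (String × Int)
  | .mk b kids, path, cnt =>
    let cnt' := if b then cnt + 1 else cnt
    match kids with
    | .nil => [("/" ++ PySem.Str.join "/" path, cnt')]
    | .cons k t rest => dfsKids (.cons k t rest) path cnt'
def dfsKids : PKids → List String → Int → List (String × Int)
  | .nil, _, _ => []
  | .cons d t rest, path, cnt => dfsT t (path ++ [d]) cnt ++ dfsKids rest path cnt
end

-- f.split('/') ('/'' is never empty, so split? always returns a value)
def splitSlash (f : String) : List String := (PySem.Str.split? f "/").getD []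

def removeSubfolders_followup (folder : List String) : List (String × Int) :=
  let root := folder.foldl (fun t f => insertT t ((splitSlash f).drop 1)) (.mk false .nil)
  dfsT root [] 0

-- ===== PORT B =====
-- total suffix weight: termination measure for the partition recursion
def pvWeight (ss : List (List String)) : Nat := (ss.map (fun s => s.length + 1)).sum

-- groups of the suffixes by first segment, first-occurrence order (only applied to
-- non-empty suffixes; Python's s[0] is rendered as headI, equal to s[0] on them)
def groupByHead : List (List String) → List (String × List (List String))
  | [] => []
  | s :: rest =>
    (s.headI, (s :: rest).filterMap (fun x => if x.headI = s.headI then some (x.drop 1) else none))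
      :: groupByHead ((s :: rest).filter (fun x => x.headI ≠ s.headI))
termination_by l => l.length
decreasing_by
  have h1 : ((s :: rest).filter (fun x => decide (x.headI ≠ s.headI))).length
      ≤ (rest.filter (fun x => decide (x.headI ≠ s.headI))).length := by
    simp [List.filter]
  have h2 := List.length_filter_le (fun x => decide (x.headI ≠ s.headI)) rest
  simp only [List.length_cons]
  omega

lemma pvWeight_filter_le (p : List String → Bool) (ss : List (List String)) :
    pvWeight (ss.filter p) ≤ pvWeight ss := by
  induction ss with
  | nil => simp [pvWeight]
  | cons s r ih =>
    by_cases hp : p s <;> simp [hp, pvWeight] at * <;> omega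

lemma pvWeight_filterMap_head (h : String) (ss : List (List String))
    (hne : ∀ s ∈ ss, s ≠ []) :
    pvWeight (ss.filterMap (fun x => if x.headI = h then some (x.drop 1) else none))
      + ss.countP (fun x => x.headI = h) ≤ pvWeight ss := by
  induction ss with
  | nil => simp [pvWeight]
  | cons s r ih =>
    have hs : s ≠ [] := hne s List.mem_cons_self
    have ih' := ih (fun x hx => hne x (List.mem_cons_of_mem _ hx))
    have hlen : s.length = (s.drop 1).length + 1 := by
      cases s with
      | nil => exact absurd rfl hs
      | cons a t => simp
    by_cases hh : s.headI = h
    · simp only [List.filterMap_cons, hh, List.countP_cons, pvWeight,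
        List.map_cons, List.sum_cons] at *
      simp at *
      omega
    · simp only [List.filterMap_cons, if_neg hh, List.countP_cons, pvWeight,
        List.map_cons, List.sum_cons] at *
      simp [hh] at *
      omega

lemma mem_groupByHead_weight :
    ∀ (rest : List (List String)), (∀ s ∈ rest, s ≠ []) →
    ∀ {h : String} {g : List (List String)}, (h, g) ∈ groupByHead rest →
    pvWeight g < pvWeight rest := by
  intro rest
  induction rest using groupByHead.induct with
  | case1 => intro _ h g hm; simp [groupByHead] at hm
  | case2 s r ih =>
    intro hne h g hm
    rw [groupByHead] at hm
    rcases List.mem_cons.mp hm with heq | htail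
    · have h1 := pvWeight_filterMap_head s.headI (s :: r) hne
      have hcount : 1 ≤ (s :: r).countP (fun x => decide (x.headI = s.headI)) := by
        simp
      have hg : g = (s :: r).filterMap
          (fun x => if x.headI = s.headI then some (x.drop 1) else none) := by
        simpa using congrArg Prod.snd heq
      subst hg
      omega
    · have hne' : ∀ x ∈ (s :: r).filter (fun x => x.headI ≠ s.headI), x ≠ [] :=
        fun x hx => hne x (List.mem_of_mem_filter hx)
      have hlt := ih hne' htail
      have hle := pvWeight_filter_le (fun x => decide (x.headI ≠ s.headI)) (s :: r)
      omega

def solveB (path : List String) (cnt : Int) (suffixes : List (List String)) :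
    List (String × Int) :=
    let cnt' := if suffixes.contains ([] : List String) then cnt + 1 else cnt
    let rest := suffixes.filter (fun s => s ≠ [])
    if rest = [] then [("/" ++ PySem.Str.join "/" path, cnt')]
    else ((groupByHead rest).attach.map
            (fun x => solveB (path ++ [x.1.1]) cnt' x.1.2)).flatten
termination_by pvWeight suffixes
decreasing_by
  have hne : ∀ s ∈ suffixes.filter (fun s => !decide (s = [])), s ≠ [] := by
    intro s hs
    simpa using List.of_mem_filter hs
  have hm : ((↑x : String × List (List String)).1, (↑x : String × List (List String)).2)
      ∈ groupByHead (suffixes.filter (fun s => !decide (s = []))) := by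
    have hm0 := x.2
    simp only [rest, List.unattach_filter, List.unattach_attach] at hm0
    simpa using hm0
  have h1 := mem_groupByHead_weight _ hne hm
  have h2 := pvWeight_filter_le (fun s => !decide (s = [])) suffixes
  omega

def removeSubfolders_followup_alt (folder : List String) : List (String × Int) :=
  solveB [] 0 (folder.map (fun f => (splitSlash f).drop 1))

-- ===== PRECONDITION & SPEC =====
def Spec_removeSubfolders_followup (folder : List String) (out : List (String × Int)) : Prop := out = removeSubfolders_followup_alt folder
instance (folder : List String) (out : List (String × Int)) : Decidable (Spec_removeSubfolders_followup folder out) := by unfold Spec_removeSubfolders_followup; infer_instance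

-- ===== CLAIM (what is proved, stated in full; the proofs are below) =====
def Claim_equal_removeSubfolders_followup : Prop := ∀ (folder : List String), Dom_removeSubfolders_followup folder → Spec_removeSubfolders_followup folder (removeSubfolders_followup folder)

-- ===== LEMMAS AND PROOFS =====

def toKids : List (String × PTrie) → PKids
  | [] => .nil
  | (k, t) :: r => .cons k t (toKids r)

-- the trie A builds from a list of suffixes, characterised through B's grouping
def specT (ss : List (List String)) : PTrie :=
    .mk (decide (([] : List String) ∈ ss))
      (toKids ((groupByHead (ss.filter (fun s => s ≠ []))).attach.map
        (fun x => (x.1.1, specT x.1.2))))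
termination_by pvWeight ss
decreasing_by
  have hne : ∀ s ∈ ss.filter (fun s => !decide (s = [])), s ≠ [] := by
    intro s hs
    simpa using List.of_mem_filter hs
  have hm : ((↑x : String × List (List String)).1, (↑x : String × List (List String)).2)
      ∈ groupByHead (ss.filter (fun s => !decide (s = []))) := by
    simpa using x.2
  have h1 := mem_groupByHead_weight _ hne hm
  have h2 := pvWeight_filter_le (fun s => !decide (s = [])) ss
  omega

lemma specT_eq (ss : List (List String)) :
    specT ss = .mk (decide (([] : List String) ∈ ss))
      (toKids ((groupByHead (ss.filter (fun s => s ≠ []))).map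
        (fun p => (p.1, specT p.2)))) := by
  rw [specT]
  congr 2
  simp only [List.map_attach_eq_pmap, List.pmap_eq_map]

lemma solveB_eq (path : List String) (cnt : Int) (ss : List (List String)) :
    solveB path cnt ss =
      (let cnt' := if ss.contains ([] : List String) then cnt + 1 else cnt
       let rest := ss.filter (fun s => s ≠ [])
       if rest = [] then [("/" ++ PySem.Str.join "/" path, cnt')]
       else ((groupByHead rest).map (fun p => solveB (path ++ [p.1]) cnt' p.2)).flatten) := by
  rw [solveB]
  simp only [List.map_attach_eq_pmap, List.pmap_eq_map]

-- insertion-order update of the group list when one more suffix h :: t arrives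
def updG : List (String × List (List String)) → String → List String →
    List (String × List (List String))
  | [], h, t => [(h, [t])]
  | (k, g) :: gs, h, t =>
      if k = h then (k, g ++ [t]) :: gs else (k, g) :: updG gs h t

lemma specT_nil : specT [] = .mk false .nil := by
  rw [specT_eq]
  simp [groupByHead, toKids]

lemma groupByHead_append (rest : List (List String)) (h : String) (t : List String) :
    groupByHead (rest ++ [h :: t]) = updG (groupByHead rest) h t := by
  induction rest using groupByHead.induct with
  | case1 =>
    rw [List.nil_append, groupByHead, groupByHead]
    simp [groupByHead, updG]
  | case2 s r ih =>
    rw [List.cons_append, groupByHead, groupByHead, updG]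
    by_cases hh : s.headI = h
    · simp only [List.filterMap_cons, List.filter_cons, ← List.cons_append,
        List.filterMap_append, List.filter_append]
      simp [hh]
    · have hne : ¬ ((h :: t).headI = s.headI) := by
        simp
        exact fun he => hh he.symm
      simp only [List.filterMap_cons, List.filter_cons, ← List.cons_append,
        List.filterMap_append, List.filter_append]
      simp only [List.headI_cons] at hne ⊢
      simp [hne, hh]
      simpa [List.filter_cons] using ih

lemma updKid_spec (h : String) (t : List String)
    (IH : ∀ g : List (List String), insertT (specT g) t = specT (g ++ [t])) :
    ∀ gl : List (String × List (List String)),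
    updKid (toKids (gl.map (fun p => (p.1, specT p.2)))) h (fun tr => insertT tr t)
      = toKids ((updG gl h t).map (fun p => (p.1, specT p.2))) := by
  intro gl
  induction gl with
  | nil =>
    simp only [List.map_nil, toKids, updKid, updG, List.map_cons]
    rw [← specT_nil, IH []]
    simp
  | cons p gs ih =>
    obtain ⟨k, g⟩ := p
    by_cases hk : k = h
    · simp [toKids, updKid, updG, hk, IH g]
    · simp [toKids, updKid, updG, hk, ih]

lemma insert_spec : ∀ (s : List String) (ss : List (List String)),
    insertT (specT ss) s = specT (ss ++ [s]) := by
  intro s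
  induction s with
  | nil =>
    intro ss
    rw [specT_eq ss, specT_eq (ss ++ [[]])]
    simp [insertT, List.filter_append, List.mem_append]
  | cons d ds ih =>
    intro ss
    rw [specT_eq ss, specT_eq (ss ++ [d :: ds])]
    simp only [insertT]
    have hmem : (([] : List String) ∈ ss ++ [d :: ds]) ↔ (([] : List String) ∈ ss) := by
      simp [List.mem_append]
    have hfil : (ss ++ [d :: ds]).filter (fun s => s ≠ []) =
        ss.filter (fun s => s ≠ []) ++ [d :: ds] := by
      simp [List.filter_append]
    rw [hfil, groupByHead_append]
    rw [updKid_spec d ds ih]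
    congr 1
    simp [hmem]

lemma build_spec_gen : ∀ (ss pre : List (List String)),
    ss.foldl insertT (specT pre) = specT (pre ++ ss) := by
  intro ss
  induction ss with
  | nil => intro pre; simp
  | cons s r ih =>
    intro pre
    rw [List.foldl_cons, insert_spec, ih]
    simp

lemma build_spec (ss : List (List String)) :
    ss.foldl insertT (.mk false .nil) = specT ss := by
  rw [← specT_nil, build_spec_gen]
  simp

lemma dfsKids_flat (path : List String) (cnt : Int) :
    ∀ gl : List (String × List (List String)),
    (∀ p ∈ gl, dfsT (specT p.2) (path ++ [p.1]) cnt = solveB (path ++ [p.1]) cnt p.2) →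
    dfsKids (toKids (gl.map (fun p => (p.1, specT p.2)))) path cnt
      = (gl.map (fun p => solveB (path ++ [p.1]) cnt p.2)).flatten := by
  intro gl
  induction gl with
  | nil => intro _; simp [toKids, dfsKids]
  | cons p gs ih =>
    intro hp
    obtain ⟨k, g⟩ := p
    simp only [List.map_cons, toKids, dfsKids, List.flatten_cons]
    rw [hp (k, g) List.mem_cons_self, ih (fun q hq => hp q (List.mem_cons_of_mem _ hq))]

lemma dfsT_cons (b : Bool) (k : String) (t : PTrie) (r : PKids) (pa : List String) (c : Int) :
    dfsT (.mk b (.cons k t r)) pa c = dfsKids (.cons k t r) pa (if b then c + 1 else c) := by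
  rw [dfsT]

lemma main_aux : ∀ (n : Nat) (ss : List (List String)), pvWeight ss ≤ n →
    ∀ (path : List String) (cnt : Int),
    dfsT (specT ss) path cnt = solveB path cnt ss := by
  intro n
  induction n using Nat.strong_induction_on with
  | _ n ihn =>
    intro ss hn path cnt
    rw [specT_eq, solveB_eq]
    have hcontains : (ss.contains ([] : List String)) = decide (([] : List String) ∈ ss) := by
      by_cases hmem : ([] : List String) ∈ ss <;> simp [hmem]
    simp only [hcontains]
    by_cases hrest : ss.filter (fun s => s ≠ []) = []
    · rw [hrest]
      simp [groupByHead, toKids, dfsT]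
    · have hgb : groupByHead (ss.filter (fun s => s ≠ [])) ≠ [] := by
        intro hgbe
        apply hrest
        cases hre : ss.filter (fun s => s ≠ []) with
        | nil => rfl
        | cons a l => rw [hre, groupByHead] at hgbe; exact absurd hgbe (by simp)
      simp only [if_neg hrest]
      have hne : ∀ s ∈ ss.filter (fun s => s ≠ []), s ≠ [] := by
        intro s hs
        simpa using List.of_mem_filter hs
      have hstep : ∀ p ∈ groupByHead (ss.filter (fun s => s ≠ [])),
          dfsT (specT p.2)
            (path ++ [p.1]) (if decide (([] : List String) ∈ ss) = true then cnt + 1 else cnt)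
          = solveB (path ++ [p.1]) (if decide (([] : List String) ∈ ss) = true then cnt + 1 else cnt) p.2 := by
        intro p hp
        have hw : pvWeight p.2 < pvWeight (ss.filter (fun s => s ≠ [])) := by
          refine mem_groupByHead_weight _ hne (h := p.1) (g := p.2) ?_
          simpa using hp
        have hle := pvWeight_filter_le (fun s => decide (s ≠ [])) ss
        exact ihn (pvWeight p.2) (by omega) p.2 (le_refl _) _ _
      cases hgbl : groupByHead (ss.filter (fun s => s ≠ [])) with
      | nil => exact absurd hgbl hgb
      | cons q gl =>
        obtain ⟨k, g⟩ := q
        rw [hgbl] at hstep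
        simp only [List.map_cons, toKids]
        rw [dfsT_cons]
        rw [show PKids.cons k (specT g) (toKids (gl.map (fun p => (p.1, specT p.2))))
              = toKids (((k, g) :: gl).map (fun p => (p.1, specT p.2))) from rfl]
        rw [dfsKids_flat path _ ((k, g) :: gl) hstep]
        simp

lemma main_lemma : ∀ (ss : List (List String)) (path : List String) (cnt : Int),
    dfsT (specT ss) path cnt = solveB path cnt ss := by
  intro ss path cnt
  exact main_aux (pvWeight ss) ss (le_refl _) path cnt

-- ===== VERDICT (by name: the statement is the Claim_ definition above) =====
theorem removeSubfolders_followup_spec : Claim_equal_removeSubfolders_followup := by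
  intro folder _
  unfold Spec_removeSubfolders_followup removeSubfolders_followup removeSubfolders_followup_alt
  rw [show (fun (t : PTrie) (f : String) => insertT t ((splitSlash f).drop 1))
        = (fun t f => insertT t ((fun g => (splitSlash g).drop 1) f)) from rfl,
      ← List.foldl_map, build_spec, main_lemma]
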